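-- pv_equiv track=rewrite | github.com/sunny18-max/Explainable-Behavioral-Security-Platform | security_monitor/storage.py | _domain_category
-- ===== SOURCE A (Python) =====
-- def _domain_category(domain: str) -> str:
--     cleaned = domain.strip().lower()
--     if cleaned.startswith("www."):
--         cleaned = cleaned[4:]
--     if not cleaned:
--         return ""
--     search_domains = ("google.com", "bing.com", "duckduckgo.com", "search.brave.com", "yahoo.com")
--     work_domains = ("office.com", "sharepoint.com", "teams.microsoft.com", "outlook.office.com", "notion.so", "atlassian.net")
--     social_domains = ("youtube.com", "linkedin.com", "reddit.com", "x.com", "twitter.com", "instagram.com", "facebook.com")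
--     admin_domains = ("learn.microsoft.com", "docs.microsoft.com", "github.com", "stackoverflow.com")
--     if any(cleaned == item or cleaned.endswith(f".{item}") for item in search_domains):
--         return "search"
--     if any(cleaned == item or cleaned.endswith(f".{item}") for item in work_domains):
--         return "work"
--     if any(cleaned == item or cleaned.endswith(f".{item}") for item in social_domains):
--         return "social"
--     if any(cleaned == item or cleaned.endswith(f".{item}") for item in admin_domains):
--         return "admin_reference"
--     return "unknown"
-- ===== SOURCE B (Python) =====
-- _CATEGORY = {
--     "google.com": "search", "bing.com": "search", "duckduckgo.com": "search",
--     "search.brave.com": "search", "yahoo.com": "search",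
--     "office.com": "work", "sharepoint.com": "work", "teams.microsoft.com": "work",
--     "outlook.office.com": "work", "notion.so": "work", "atlassian.net": "work",
--     "youtube.com": "social", "linkedin.com": "social", "reddit.com": "social",
--     "x.com": "social", "twitter.com": "social", "instagram.com": "social",
--     "facebook.com": "social",
--     "learn.microsoft.com": "admin_reference", "docs.microsoft.com": "admin_reference",
--     "github.com": "admin_reference", "stackoverflow.com": "admin_reference",
-- }
--
--
-- def _after_dot(s):
--     for i, ch in enumerate(s):
--         if ch == ".":
--             return s[i + 1:]
--     return None
--
--
-- def _domain_category(domain: str) -> str: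
--     cleaned = domain.strip().lower()
--     if cleaned.startswith("www."):
--         cleaned = cleaned[4:]
--     if not cleaned:
--         return ""
--     rest = cleaned
--     while True:
--         cat = _CATEGORY.get(rest)
--         if cat is not None:
--             return cat
--         rest = _after_dot(rest)
--         if rest is None:
--             return "unknown"
-- ===== Notes on version B (the rewrite author's own statement) =====
-- stated objective: alternative
-- what changed: Replaced A's four priority-ordered tuple scans (equality or endswith per pattern) by a single domain-to-category dict that B probes with each dot-boundary suffix of the cleaned domain, longest first.
import Mathlib
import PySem

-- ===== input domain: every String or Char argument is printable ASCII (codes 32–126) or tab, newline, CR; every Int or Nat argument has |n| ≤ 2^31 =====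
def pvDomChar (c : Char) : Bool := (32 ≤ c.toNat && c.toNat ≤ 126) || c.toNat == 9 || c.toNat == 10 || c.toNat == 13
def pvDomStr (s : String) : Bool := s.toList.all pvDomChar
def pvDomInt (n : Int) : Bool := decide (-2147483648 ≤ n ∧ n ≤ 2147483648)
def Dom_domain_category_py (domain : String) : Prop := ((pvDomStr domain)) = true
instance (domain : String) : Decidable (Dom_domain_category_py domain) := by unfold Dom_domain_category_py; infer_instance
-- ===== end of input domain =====

-- B replaces A's four priority-ordered endswith scans over category tuples by a single
-- domain→category dict probed at each dot-boundary suffix of the cleaned domain, longest first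
-- (objective: alternative; same return value, no speed claim).

-- ===== PORT A =====
def pvSearchDomains : List (List Char) :=
  [['g', 'o', 'o', 'g', 'l', 'e', '.', 'c', 'o', 'm'],
   ['b', 'i', 'n', 'g', '.', 'c', 'o', 'm'],
   ['d', 'u', 'c', 'k', 'd', 'u', 'c', 'k', 'g', 'o', '.', 'c', 'o', 'm'],
   ['s', 'e', 'a', 'r', 'c', 'h', '.', 'b', 'r', 'a', 'v', 'e', '.', 'c', 'o', 'm'],
   ['y', 'a', 'h', 'o', 'o', '.', 'c', 'o', 'm']]

def pvWorkDomains : List (List Char) :=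
  [['o', 'f', 'f', 'i', 'c', 'e', '.', 'c', 'o', 'm'],
   ['s', 'h', 'a', 'r', 'e', 'p', 'o', 'i', 'n', 't', '.', 'c', 'o', 'm'],
   ['t', 'e', 'a', 'm', 's', '.', 'm', 'i', 'c', 'r', 'o', 's', 'o', 'f', 't', '.', 'c', 'o', 'm'],
   ['o', 'u', 't', 'l', 'o', 'o', 'k', '.', 'o', 'f', 'f', 'i', 'c', 'e', '.', 'c', 'o', 'm'],
   ['n', 'o', 't', 'i', 'o', 'n', '.', 's', 'o'],
   ['a', 't', 'l', 'a', 's', 's', 'i', 'a', 'n', '.', 'n', 'e', 't']]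

def pvSocialDomains : List (List Char) :=
  [['y', 'o', 'u', 't', 'u', 'b', 'e', '.', 'c', 'o', 'm'],
   ['l', 'i', 'n', 'k', 'e', 'd', 'i', 'n', '.', 'c', 'o', 'm'],
   ['r', 'e', 'd', 'd', 'i', 't', '.', 'c', 'o', 'm'],
   ['x', '.', 'c', 'o', 'm'],
   ['t', 'w', 'i', 't', 't', 'e', 'r', '.', 'c', 'o', 'm'],
   ['i', 'n', 's', 't', 'a', 'g', 'r', 'a', 'm', '.', 'c', 'o', 'm'],
   ['f', 'a', 'c', 'e', 'b', 'o', 'o', 'k', '.', 'c', 'o', 'm']]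

def pvAdminDomains : List (List Char) :=
  [['l', 'e', 'a', 'r', 'n', '.', 'm', 'i', 'c', 'r', 'o', 's', 'o', 'f', 't', '.', 'c', 'o', 'm'],
   ['d', 'o', 'c', 's', '.', 'm', 'i', 'c', 'r', 'o', 's', 'o', 'f', 't', '.', 'c', 'o', 'm'],
   ['g', 'i', 't', 'h', 'u', 'b', '.', 'c', 'o', 'm'],
   ['s', 't', 'a', 'c', 'k', 'o', 'v', 'e', 'r', 'f', 'l', 'o', 'w', '.', 'c', 'o', 'm']]

def domain_category_py (domain : String) : String :=
  let cleaned := PySem.Chars.lower (PySem.Chars.strip domain.toList)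
  let cleaned := if PySem.Chars.startswith cleaned ['w', 'w', 'w', '.'] then PySem.Chars.slice cleaned (some 4) none else cleaned
  if cleaned = [] then ""
  else if pvSearchDomains.any (fun item => cleaned == item || PySem.Chars.endswith cleaned ('.' :: item)) then "search"
  else if pvWorkDomains.any (fun item => cleaned == item || PySem.Chars.endswith cleaned ('.' :: item)) then "work"
  else if pvSocialDomains.any (fun item => cleaned == item || PySem.Chars.endswith cleaned ('.' :: item)) then "social"
  else if pvAdminDomains.any (fun item => cleaned == item || PySem.Chars.endswith cleaned ('.' :: item)) then "admin_reference"
  else "unknown"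

-- ===== PORT B =====
-- the module-level _CATEGORY dict of Source B (string keys, insertion order)
def pvPairs : List (String × String) := [
  ("google.com", "search"), ("bing.com", "search"), ("duckduckgo.com", "search"),
  ("search.brave.com", "search"), ("yahoo.com", "search"),
  ("office.com", "work"), ("sharepoint.com", "work"), ("teams.microsoft.com", "work"),
  ("outlook.office.com", "work"), ("notion.so", "work"), ("atlassian.net", "work"),
  ("youtube.com", "social"), ("linkedin.com", "social"), ("reddit.com", "social"),
  ("x.com", "social"), ("twitter.com", "social"), ("instagram.com", "social"),
  ("facebook.com", "social"),
  ("learn.microsoft.com", "admin_reference"), ("docs.microsoft.com", "admin_reference"),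
  ("github.com", "admin_reference"), ("stackoverflow.com", "admin_reference")]

def pvCategory : PySem.Dict String String := PySem.Dict.mk pvPairs

def pvAfterDot : List Char → Option (List Char)
  | [] => none
  | c :: t => if c = '.' then some t else pvAfterDot t

-- termination lemma for pvLookup (cited in its decreasing_by)
theorem pvAfterDot_length : ∀ {s t : List Char}, pvAfterDot s = some t → t.length < s.length := by
  intro s
  induction s with
  | nil => intro t h; simp [pvAfterDot] at h
  | cons c cs ih =>
    intro t h
    by_cases hc : c = '.'
    · simp [pvAfterDot, hc] at h
      simp [← h]
    · simp [pvAfterDot, hc] at h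
      have := ih h
      simp
      omega

def pvLookup (rest : List Char) : String :=
  match PySem.Dict.get? pvCategory (String.ofList rest) with
  | some cat => cat
  | none =>
    match h : pvAfterDot rest with
    | none => "unknown"
    | some t => pvLookup t
termination_by rest.length
decreasing_by exact pvAfterDot_length h

def domain_category_py_alt (domain : String) : String :=
  let cleaned := PySem.Chars.lower (PySem.Chars.strip domain.toList)
  let cleaned := if PySem.Chars.startswith cleaned ['w', 'w', 'w', '.'] then PySem.Chars.slice cleaned (some 4) none else cleaned
  if cleaned = [] then ""
  else pvLookup cleaned

-- ===== PRECONDITION & SPEC =====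
def Spec_domain_category_py (domain : String) (out : String) : Prop := out = domain_category_py_alt domain
instance (domain : String) (out : String) : Decidable (Spec_domain_category_py domain out) := by unfold Spec_domain_category_py; infer_instance

-- ===== CLAIM (what is proved, stated in full; the proofs are below) =====
def Claim_equal_domain_category_py : Prop := ∀ (domain : String), Dom_domain_category_py domain → Spec_domain_category_py domain (domain_category_py domain)

-- ===== LEMMAS AND PROOFS =====

-- the dict's pairs with their keys as character lists (proof-side view of pvPairs)
def pvTbl : List (List Char × String) := pvPairs.map (fun p => (p.1.toList, p.2))

-- cleaned matches a table entry d: it equals d or ends with "." ++ d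
def pvMatches (c d : List Char) : Prop := c = d ∨ ('.' :: d) <:+ c

theorem pvMatches_suffix {c d : List Char} (h : pvMatches c d) : d <:+ c := by
  rcases h with rfl | h
  · exact List.suffix_refl _
  · exact (List.suffix_cons '.' d).trans h

-- any two suffix-related table entries carry the same category
theorem pvTbl_suffix : ∀ p ∈ pvTbl, ∀ q ∈ pvTbl, p.1 <:+ q.1 → p.2 = q.2 := by
  have hb : (pvTbl.all fun p => pvTbl.all fun q => !(p.1.isSuffixOf q.1) || p.2 == q.2) = true := by decide
  intro p hp q hq hsuf
  have h1 := List.all_eq_true.mp (List.all_eq_true.mp hb p hp) q hq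
  simp only [Bool.or_eq_true, Bool.not_eq_true', beq_iff_eq,
    Bool.eq_false_iff, Ne, List.isSuffixOf_iff_suffix] at h1
  tauto

theorem pvTbl_partition : ∀ p ∈ pvTbl,
    p.1 ∈ pvSearchDomains ∨ p.1 ∈ pvWorkDomains ∨ p.1 ∈ pvSocialDomains ∨ p.1 ∈ pvAdminDomains := by
  decide

theorem pvSearch_mem : ∀ i ∈ pvSearchDomains, (i, "search") ∈ pvTbl := by decide
theorem pvWork_mem : ∀ i ∈ pvWorkDomains, (i, "work") ∈ pvTbl := by decide
theorem pvSocial_mem : ∀ i ∈ pvSocialDomains, (i, "social") ∈ pvTbl := by decide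
theorem pvAdmin_mem : ∀ i ∈ pvAdminDomains, (i, "admin_reference") ∈ pvTbl := by decide

theorem pvAfterDot_none {s : List Char} (h : pvAfterDot s = none) : '.' ∉ s := by
  induction s with
  | nil => simp
  | cons c cs ih =>
    by_cases hc : c = '.'
    · simp [pvAfterDot, hc] at h
    · simp [pvAfterDot, hc] at h
      simp [ih h]
      exact fun hx => hc hx.symm

theorem pvAfterDot_decomp {s t : List Char} (h : pvAfterDot s = some t) :
    ∃ pre, '.' ∉ pre ∧ s = pre ++ '.' :: t := by
  induction s with
  | nil => simp [pvAfterDot] at h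
  | cons c cs ih =>
    by_cases hc : c = '.'
    · simp [pvAfterDot, hc] at h
      exact ⟨[], by simp, by simp [hc, h]⟩
    · simp [pvAfterDot, hc] at h
      obtain ⟨pre, hpre, heq⟩ := ih h
      refine ⟨c :: pre, ?_, by simp [heq]⟩
      simp [hpre]
      exact fun hx => hc hx.symm

theorem pvMatches_lift {s t e : List Char} (hs : pvAfterDot s = some t)
    (h : pvMatches t e) : pvMatches s e := by
  obtain ⟨pre, _, rfl⟩ := pvAfterDot_decomp hs
  have hsuf : ('.' :: t) <:+ pre ++ '.' :: t := ⟨pre, rfl⟩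
  rcases h with rfl | h
  · exact Or.inr hsuf
  · exact Or.inr (h.trans ((List.suffix_cons '.' t).trans hsuf))

theorem pvMatches_push {s t e : List Char} (hs : pvAfterDot s = some t)
    (h : ('.' :: e) <:+ s) : pvMatches t e := by
  obtain ⟨pre, hpre, rfl⟩ := pvAfterDot_decomp hs
  obtain ⟨q, hq⟩ := h
  have hq1 : q <+: pre ++ '.' :: t := ⟨'.' :: e, hq⟩
  rcases List.prefix_or_prefix_of_prefix hq1 (List.prefix_append pre ('.' :: t)) with hqp | hpq
  · obtain ⟨r, hr⟩ := hqp
    rw [← hr, List.append_assoc] at hq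
    have hr2 : ('.' : Char) :: e = r ++ '.' :: t := List.append_cancel_left hq
    match r, hr2 with
    | [], hr2 =>
      exact Or.inl (List.cons_eq_cons.mp hr2).2.symm
    | rh :: rt, hr2 =>
      exfalso
      have hrh : ('.' : Char) = rh := (List.cons_eq_cons.mp hr2).1
      apply hpre
      rw [← hr]
      exact List.mem_append.mpr (Or.inr (by rw [hrh]; exact List.mem_cons_self))
  · obtain ⟨r, hr⟩ := hpq
    rw [← hr, List.append_assoc] at hq
    have hr2 : r ++ '.' :: e = ('.' : Char) :: t := List.append_cancel_left hq
    match r, hr2 with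
    | [], hr2 =>
      exact Or.inl (List.cons_eq_cons.mp hr2).2.symm
    | rh :: rt, hr2 =>
      exact Or.inr ⟨rt, (List.cons_eq_cons.mp hr2).2⟩

-- bridge: Dict lookups in pvCategory ↔ membership in the char-list table pvTbl
theorem pvGet?_some_mem {c : List Char} {cat : String}
    (h : PySem.Dict.get? pvCategory (String.ofList c) = some cat) : (c, cat) ∈ pvTbl := by
  have hm : (String.ofList c, cat) ∈ pvPairs := PySem.Dict.mem_items_of_get?_eq_some pvCategory h
  exact List.mem_map.mpr ⟨(String.ofList c, cat), hm, by simp⟩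

theorem pvGet?_none_not_mem {c : List Char} (h : PySem.Dict.get? pvCategory (String.ofList c) = none) :
    ∀ cat, (c, cat) ∉ pvTbl := by
  intro cat hmem
  obtain ⟨⟨s, cat'⟩, hs, heq⟩ := List.mem_map.mp hmem
  obtain ⟨h1, h2⟩ := Prod.mk.injEq .. ▸ heq
  apply (PySem.Dict.get?_eq_none_iff_not_mem_keys pvCategory (String.ofList c)).mp h
  have : String.ofList c = s := by rw [← h1]; exact String.ofList_toList
  rw [this]
  exact PySem.Dict.mem_keys_of_mem_items pvCategory (p := (s, cat')) hs

theorem pvLookup_eq (γ : String) : ∀ c : List Char,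
    (∀ p ∈ pvTbl, pvMatches c p.1 → p.2 = γ) → (∃ p ∈ pvTbl, pvMatches c p.1) →
    pvLookup c = γ := by
  intro c
  fun_induction pvLookup c with
  | case1 c cat hget =>
    intro hγ _
    exact hγ (c, cat) (pvGet?_some_mem hget) (Or.inl rfl)
  | case2 c hget hdot =>
    rintro _ ⟨p, hp, hm⟩
    exfalso
    rcases hm with rfl | hm
    · exact pvGet?_none_not_mem hget p.2 (by simpa using hp)
    · exact pvAfterDot_none hdot (hm.subset List.mem_cons_self)
  | case3 c hget t hdot ih =>
    rintro hγ ⟨p, hp, hm⟩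
    apply ih
    · exact fun q hq hmq => hγ q hq (pvMatches_lift hdot hmq)
    · rcases hm with rfl | hm
      · exact absurd (by simpa using hp) (pvGet?_none_not_mem hget p.2)
      · exact ⟨p, hp, pvMatches_push hdot hm⟩

theorem pvLookup_unknown : ∀ c : List Char,
    (∀ p ∈ pvTbl, ¬ pvMatches c p.1) → pvLookup c = "unknown" := by
  intro c
  fun_induction pvLookup c with
  | case1 c cat hget =>
    intro hall
    exact absurd (Or.inl rfl) (hall (c, cat) (pvGet?_some_mem hget))
  | case2 c hget hdot => intro _; rfl
  | case3 c hget t hdot ih =>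
    intro hall
    exact ih fun q hq hmq => hall q hq (pvMatches_lift hdot hmq)

theorem pvChain_eq (c : List Char) :
    (if c = [] then ""
     else if pvSearchDomains.any (fun item => c == item || PySem.Chars.endswith c ('.' :: item)) then "search"
     else if pvWorkDomains.any (fun item => c == item || PySem.Chars.endswith c ('.' :: item)) then "work"
     else if pvSocialDomains.any (fun item => c == item || PySem.Chars.endswith c ('.' :: item)) then "social"
     else if pvAdminDomains.any (fun item => c == item || PySem.Chars.endswith c ('.' :: item)) then "admin_reference"
     else "unknown") = (if c = [] then "" else pvLookup c) := by
  by_cases hc : c = []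
  · simp [hc]
  rw [if_neg hc, if_neg hc]
  have hpred : ∀ (item : List Char), ((c == item || PySem.Chars.endswith c ('.' :: item)) = true) ↔ pvMatches c item := by
    intro item
    simp [pvMatches, PySem.Chars.endswith_iff]
  by_cases hex : ∃ p ∈ pvTbl, pvMatches c p.1
  · obtain ⟨p₀, hp₀, hm₀⟩ := hex
    have hγ : ∀ q ∈ pvTbl, pvMatches c q.1 → q.2 = p₀.2 := by
      intro q hq hmq
      rcases List.suffix_or_suffix_of_suffix (pvMatches_suffix hmq) (pvMatches_suffix hm₀) with h | h
      · exact pvTbl_suffix q hq p₀ hp₀ h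
      · exact (pvTbl_suffix p₀ hp₀ q hq h).symm
    rw [pvLookup_eq p₀.2 c hγ ⟨p₀, hp₀, hm₀⟩]
    by_cases h1 : pvSearchDomains.any (fun item => c == item || PySem.Chars.endswith c ('.' :: item)) = true
    · rw [if_pos h1]
      obtain ⟨i, hi, hpi⟩ := List.any_eq_true.mp h1
      exact hγ (i, "search") (pvSearch_mem i hi) ((hpred i).mp hpi)
    rw [if_neg h1]
    by_cases h2 : pvWorkDomains.any (fun item => c == item || PySem.Chars.endswith c ('.' :: item)) = true
    · rw [if_pos h2]
      obtain ⟨i, hi, hpi⟩ := List.any_eq_true.mp h2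
      exact hγ (i, "work") (pvWork_mem i hi) ((hpred i).mp hpi)
    rw [if_neg h2]
    by_cases h3 : pvSocialDomains.any (fun item => c == item || PySem.Chars.endswith c ('.' :: item)) = true
    · rw [if_pos h3]
      obtain ⟨i, hi, hpi⟩ := List.any_eq_true.mp h3
      exact hγ (i, "social") (pvSocial_mem i hi) ((hpred i).mp hpi)
    rw [if_neg h3]
    by_cases h4 : pvAdminDomains.any (fun item => c == item || PySem.Chars.endswith c ('.' :: item)) = true
    · rw [if_pos h4]
      obtain ⟨i, hi, hpi⟩ := List.any_eq_true.mp h4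
      exact hγ (i, "admin_reference") (pvAdmin_mem i hi) ((hpred i).mp hpi)
    rw [if_neg h4]
    exfalso
    rcases pvTbl_partition p₀ hp₀ with hmem | hmem | hmem | hmem
    · exact h1 (List.any_eq_true.mpr ⟨p₀.1, hmem, (hpred p₀.1).mpr hm₀⟩)
    · exact h2 (List.any_eq_true.mpr ⟨p₀.1, hmem, (hpred p₀.1).mpr hm₀⟩)
    · exact h3 (List.any_eq_true.mpr ⟨p₀.1, hmem, (hpred p₀.1).mpr hm₀⟩)
    · exact h4 (List.any_eq_true.mpr ⟨p₀.1, hmem, (hpred p₀.1).mpr hm₀⟩)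
  · simp only [not_exists, not_and] at hex
    rw [pvLookup_unknown c hex]
    have hno : ∀ (L : List (List Char)) (cat : String), (∀ i ∈ L, (i, cat) ∈ pvTbl) →
        L.any (fun item => c == item || PySem.Chars.endswith c ('.' :: item)) = false := by
      intro L cat hmem
      rw [List.any_eq_false]
      intro i hi hpi
      exact hex (i, cat) (hmem i hi) ((hpred i).mp hpi)
    rw [hno pvSearchDomains "search" pvSearch_mem, hno pvWorkDomains "work" pvWork_mem,
        hno pvSocialDomains "social" pvSocial_mem, hno pvAdminDomains "admin_reference" pvAdmin_mem]
    rfl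

-- ===== VERDICT (by name: the statement is the Claim_ definition above) =====
theorem domain_category_py_spec : Claim_equal_domain_category_py := by
  intro domain _
  unfold Spec_domain_category_py domain_category_py domain_category_py_alt
  exact pvChain_eq _
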